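-- pv_equiv track=rewrite | github.com/iop2000win/Algorithm | 100JOON_dynamic_programming.py | solution_Q2579
-- ===== SOURCE A (Python) =====
-- def solution_Q2579(input_list):
--     d = [0] * (len(input_list))
--     if len(input_list) <= 2:
--         return sum(input_list)
--
--     d[1] = input_list[1]
--     d[2] = input_list[1] + input_list[2]
--
--     for i in range(3, len(input_list)):
--         val_1 = d[i-2] + input_list[i]
--         val_2 = d[i-3] + input_list[i-1] + input_list[i]
--
--         d[i] = max(val_1, val_2)
--
--     return d[len(input_list)-1]
-- ===== SOURCE B (Python) =====
-- def solution_Q2579(input_list):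
--     # Complement view: a valid climb steps on stair n-1 and skips a set of stairs
--     # whose consecutive skips are 2 or 3 apart (no two adjacent skips = step size <= 2;
--     # gap <= 3 = no three consecutive steps), first skip <= 3, last skip >= n-3.
--     # Maximizing stepped sum == total of stairs 1..n-1 minus minimum skipped sum.
--     n = len(input_list)
--     if n <= 2:
--         return sum(input_list)
--     total = sum(input_list[1:])
--     if n == 3:
--         return total
--     # h[j] = minimum skipped sum over prefixes whose last skip is stair j
--     h = input_list[:4]
--     for j in range(4, n - 1):
--         h.append(input_list[j] + min(h[j - 2], h[j - 3]))
--     return total - min(h[n - 3], h[n - 2])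
-- ===== Notes on version B (the rewrite author's own statement) =====
-- stated objective: alternative
-- what changed: B solves the complement problem: instead of A's maximize-stepped-score DP d[i]=max(d[i-2]+a[i], d[i-3]+a[i-1]+a[i]), B computes the total of stairs 1..n-1 and subtracts the minimum sum of skipped stairs (skips 2-3 apart, last skip in {n-3,n-2}) via the dual recurrence h[j]=a[j]+min(h[j-2],h[j-3]).
import Mathlib
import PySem

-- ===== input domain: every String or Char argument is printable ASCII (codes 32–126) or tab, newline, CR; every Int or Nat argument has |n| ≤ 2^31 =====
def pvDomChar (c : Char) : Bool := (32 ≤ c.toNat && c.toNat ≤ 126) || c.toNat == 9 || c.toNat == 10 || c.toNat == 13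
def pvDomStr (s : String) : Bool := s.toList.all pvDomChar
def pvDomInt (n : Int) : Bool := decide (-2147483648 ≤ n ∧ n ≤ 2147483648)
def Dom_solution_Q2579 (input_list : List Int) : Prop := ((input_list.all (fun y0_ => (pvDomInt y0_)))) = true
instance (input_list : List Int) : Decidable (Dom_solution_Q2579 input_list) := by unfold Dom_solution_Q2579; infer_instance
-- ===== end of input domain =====

-- B solves the complement problem (total of stairs 1..n-1 minus minimum skipped-stairs sum) instead of A's maximize-score DP; same return value.

-- ===== PORT A =====
-- one iteration of A's for-loop: d[i] = max(d[i-2]+x[i], d[i-3]+x[i-1]+x[i])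
def pvStepA (xs : List Int) (d : List Int) (i : Nat) : List Int :=
  d.set i (max (d.getD (i-2) 0 + xs.getD i 0) (d.getD (i-3) 0 + xs.getD (i-1) 0 + xs.getD i 0))

def solution_Q2579 (input_list : List Int) : Int :=
  let n := input_list.length
  if n ≤ 2 then input_list.sum
  else
    let d := List.replicate n (0 : Int)
    let d := d.set 1 (input_list.getD 1 0)
    let d := d.set 2 (input_list.getD 1 0 + input_list.getD 2 0)
    let d := (List.range' 3 (n - 3)).foldl (pvStepA input_list) d
    d.getD (n - 1) 0

-- ===== PORT B =====
-- one iteration of B's for-loop: h.append(x[j] + min(h[j-2], h[j-3]))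
def pvStepB (xs : List Int) (h : List Int) (j : Nat) : List Int :=
  h ++ [xs.getD j 0 + min (h.getD (j-2) 0) (h.getD (j-3) 0)]

def solution_Q2579_alt (input_list : List Int) : Int :=
  let n := input_list.length
  if n ≤ 2 then input_list.sum
  else
    let total := (input_list.drop 1).sum
    if n = 3 then total
    else
      let h := input_list.take 4
      let h := (List.range' 4 (n - 1 - 4)).foldl (pvStepB input_list) h
      total - min (h.getD (n-3) 0) (h.getD (n-2) 0)

-- ===== PRECONDITION & SPEC =====
def Spec_solution_Q2579 (input_list : List Int) (out : Int) : Prop := out = solution_Q2579_alt input_list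
instance (input_list : List Int) (out : Int) : Decidable (Spec_solution_Q2579 input_list out) := by unfold Spec_solution_Q2579; infer_instance

-- ===== CLAIM (what is proved, stated in full; the proofs are below) =====
def Claim_equal_solution_Q2579 : Prop := ∀ (input_list : List Int), Dom_solution_Q2579 input_list → Spec_solution_Q2579 input_list (solution_Q2579 input_list)

-- ===== LEMMAS AND PROOFS =====

-- prefix sum of x[1..j]
def pvS (xs : List Int) : Nat → Int
  | 0 => 0
  | j + 1 => pvS xs j + xs.getD (j+1) 0

-- minimum skipped-stairs sum for the prefix 1..j (0 for j ≤ 2)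
def pvM (xs : List Int) (j : Nat) : Int :=
  if j ≤ 2 then 0
  else min (xs.getD (j-1) 0 + pvM xs (j-2)) (xs.getD (j-2) 0 + pvM xs (j-3))
termination_by j
decreasing_by all_goals omega

lemma gd_set_ne (l : List Int) (i j : Nat) (a : Int) (h : i ≠ j) :
    (l.set i a).getD j 0 = l.getD j 0 := by
  simp [List.getD, List.getElem?_set_ne h]

lemma gd_set_self (l : List Int) (i : Nat) (a : Int) (h : i < l.length) :
    (l.set i a).getD i 0 = a := by
  simp [List.getD, h]

lemma gd_replicate (n j : Nat) : (List.replicate n (0:Int)).getD j 0 = 0 := by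
  simp [List.getD, List.getElem?_replicate]
  split <;> rfl

lemma gd_append_lt (l l2 : List Int) (j : Nat) (h : j < l.length) :
    (l ++ l2).getD j 0 = l.getD j 0 := by
  simp [List.getD, List.getElem?_append_left h]

lemma gd_take_lt (l : List Int) (k j : Nat) (h : j < k) :
    (l.take k).getD j 0 = l.getD j 0 := by
  rcases lt_or_ge j l.length with hl | hl
  · simp [List.getD, List.getElem?_take_of_lt h, List.getElem?_eq_getElem hl]
  · have h1 : l[j]? = none := List.getElem?_eq_none hl
    have h2 : (l.take k)[j]? = none := List.getElem?_eq_none (by simp; omega)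
    simp [List.getD, h1, h2]

-- sum of the tail equals the prefix sum up to the last index
lemma pvS_take (xs : List Int) : ∀ j : Nat, j < xs.length →
    pvS xs j = ((xs.take (j+1)).drop 1).sum := by
  intro j
  induction j with
  | zero =>
      intro h
      match xs, h with
      | x :: t, _ => simp [pvS]
  | succ j ih =>
      intro h
      have hj : j < xs.length := by omega
      have htake : xs.take (j+1+1) = xs.take (j+1) ++ [xs.getD (j+1) 0] := by
        have hx : xs[j+1]? = some (xs.getD (j+1) 0) := by
          simp [List.getD, List.getElem?_eq_getElem h]
        rw [List.take_add_one, hx]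
        rfl
      have hlen : 1 ≤ (xs.take (j+1)).length := by
        simp; omega
      calc pvS xs (j+1) = pvS xs j + xs.getD (j+1) 0 := rfl
        _ = ((xs.take (j+1)).drop 1).sum + xs.getD (j+1) 0 := by rw [ih hj]
        _ = ((xs.take (j+1+1)).drop 1).sum := by
              rw [htake, List.drop_append_of_le_length hlen]
              simp

lemma pvS_drop (xs : List Int) (h : xs ≠ []) :
    (xs.drop 1).sum = pvS xs (xs.length - 1) := by
  have hlen : 0 < xs.length := List.length_pos_iff.mpr h
  rw [pvS_take xs (xs.length - 1) (by omega)]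
  have : xs.length - 1 + 1 = xs.length := by omega
  rw [this, List.take_length]

-- the key algebraic identity: A's max-recurrence computes S j - M j
lemma pvAlg (xs : List Int) (j : Nat) (h3 : 3 ≤ j) :
    max (pvS xs (j-2) - pvM xs (j-2) + xs.getD j 0)
        (pvS xs (j-3) - pvM xs (j-3) + xs.getD (j-1) 0 + xs.getD j 0)
      = pvS xs j - pvM xs j := by
  obtain ⟨t, rfl⟩ : ∃ t, j = t + 3 := ⟨j - 3, by omega⟩
  have hM : pvM xs (t+3)
      = min (xs.getD (t+2) 0 + pvM xs (t+1)) (xs.getD (t+1) 0 + pvM xs t) := by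
    rw [pvM]
    have hn : ¬ (t + 3 ≤ 2) := by omega
    have f1 : t + 3 - 1 = t + 2 := by omega
    have f2 : t + 3 - 2 = t + 1 := by omega
    have f3 : t + 3 - 3 = t := by omega
    simp only [hn, if_false, f1, f2, f3]
  have hS3 : pvS xs (t+3) = pvS xs t + xs.getD (t+1) 0 + xs.getD (t+2) 0 + xs.getD (t+3) 0 := by
    simp [pvS]
  have hS1 : pvS xs (t+1) = pvS xs t + xs.getD (t+1) 0 := rfl
  have e2 : t + 3 - 2 = t + 1 := by omega
  have e3 : t + 3 - 3 = t := by omega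
  have e1 : t + 3 - 1 = t + 2 := by omega
  rw [e2, e3, e1, hM, hS3, hS1]
  simp only [List.getD]
  omega

-- invariant of A's loop: the last three filled cells hold S - M, and the final cell is S(n-1) - M(n-1)
lemma loopA (xs : List Int) : ∀ (m j : Nat) (d : List Int), 3 ≤ j → j + m = xs.length →
    d.length = xs.length →
    d.getD (j-3) 0 = pvS xs (j-3) - pvM xs (j-3) →
    d.getD (j-2) 0 = pvS xs (j-2) - pvM xs (j-2) →
    d.getD (j-1) 0 = pvS xs (j-1) - pvM xs (j-1) →
    ((List.range' j m).foldl (pvStepA xs) d).getD (xs.length - 1) 0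
      = pvS xs (xs.length - 1) - pvM xs (xs.length - 1) := by
  intro m
  induction m with
  | zero =>
      intro j d h3 hj hd _ _ h1
      have : xs.length - 1 = j - 1 := by omega
      simpa [List.range', this] using h1
  | succ m ih =>
      intro j d h3 hj hd g3 g2 g1
      have hjlt : j < d.length := by omega
      have hrange : List.range' j (m+1) = j :: List.range' (j+1) m := by simp [List.range']
      rw [hrange, List.foldl_cons]
      apply ih (j+1) _ (by omega) (by omega) (by simp [pvStepA, hd])
      · have e : j + 1 - 3 = j - 2 := by omega
        rw [e]; unfold pvStepA; rw [gd_set_ne _ _ _ _ (by omega)]; exact g2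
      · have e : j + 1 - 2 = j - 1 := by omega
        rw [e]; unfold pvStepA; rw [gd_set_ne _ _ _ _ (by omega)]; exact g1
      · have e : j + 1 - 1 = j := by omega
        rw [e]; unfold pvStepA; rw [gd_set_self _ _ _ hjlt, g2, g3]
        exact pvAlg xs j h3

-- H j (the min skipped sum ending with a skip at j) in closed form
def pvHv (xs : List Int) (t : Nat) : Int := xs.getD t 0 + pvM xs (t-1)

-- invariant of B's loop: h has length j and holds pvHv at every index 1 ≤ t < j
lemma loopB (xs : List Int) : ∀ (m j : Nat) (h : List Int), 4 ≤ j → h.length = j →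
    (∀ t, 1 ≤ t → t < j → h.getD t 0 = pvHv xs t) →
    ((List.range' j m).foldl (pvStepB xs) h).length = j + m ∧
    (∀ t, 1 ≤ t → t < j + m → ((List.range' j m).foldl (pvStepB xs) h).getD t 0 = pvHv xs t) := by
  intro m
  induction m with
  | zero =>
      intro j h h4 hl hi
      simpa [List.range'] using ⟨hl, hi⟩
  | succ m ih =>
      intro j h h4 hl hi
      have hrange : List.range' j (m+1) = j :: List.range' (j+1) m := by simp [List.range']
      rw [hrange, List.foldl_cons]
      have hstep : pvStepB xs h j = h ++ [pvHv xs j] := by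
        unfold pvStepB
        have v2 := hi (j-2) (by omega) (by omega)
        have v3 := hi (j-3) (by omega) (by omega)
        rw [v2, v3]
        congr 1
        unfold pvHv
        have hM : pvM xs (j-1)
            = min (xs.getD (j-2) 0 + pvM xs (j-3)) (xs.getD (j-3) 0 + pvM xs (j-4)) := by
          rw [pvM]
          have hn : ¬ (j - 1 ≤ 2) := by omega
          have e1 : j - 1 - 1 = j - 2 := by omega
          have e2 : j - 1 - 2 = j - 3 := by omega
          have e3 : j - 1 - 3 = j - 4 := by omega
          simp only [hn, if_false, e1, e2, e3]
        rw [hM]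
        have e2 : j - 2 - 1 = j - 3 := by omega
        have e3 : j - 3 - 1 = j - 4 := by omega
        simp [e2, e3]
      rw [hstep]
      have := ih (j+1) (h ++ [pvHv xs j]) (by omega) (by simp [hl])
        (by
          intro t ht1 htj
          rcases lt_or_ge t j with hlt | hge
          · rw [gd_append_lt _ _ _ (by omega)]; exact hi t ht1 hlt
          · have : t = j := by omega
            subst this
            have : (h ++ [pvHv xs t]).getD t 0 = pvHv xs t := by
              simp [List.getD, hl]
            exact this)
      constructor
      · have hl1 := this.1; omega
      · intro t ht1 ht2
        exact this.2 t ht1 (by omega)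

-- ===== VERDICT (by name: the statement is the Claim_ definition above) =====
theorem solution_Q2579_spec : Claim_equal_solution_Q2579 := by
  intro xs _
  unfold Spec_solution_Q2579 solution_Q2579 solution_Q2579_alt
  by_cases h2 : xs.length ≤ 2
  · simp [h2]
  · rw [if_neg h2, if_neg h2]
    simp only []
    -- A side: reduce to S(n-1) - M(n-1)
    have hne : xs ≠ [] := by intro h; subst h; simp at h2
    have hd0 : (((List.replicate xs.length (0:Int)).set 1 (xs.getD 1 0)).set 2
        (xs.getD 1 0 + xs.getD 2 0)).length = xs.length := by simp
    have g0 : (((List.replicate xs.length (0:Int)).set 1 (xs.getD 1 0)).set 2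
        (xs.getD 1 0 + xs.getD 2 0)).getD 0 0 = pvS xs 0 - pvM xs 0 := by
      rw [gd_set_ne _ _ _ _ (by omega), gd_set_ne _ _ _ _ (by omega), gd_replicate]
      simp [pvS, pvM]
    have g1 : (((List.replicate xs.length (0:Int)).set 1 (xs.getD 1 0)).set 2
        (xs.getD 1 0 + xs.getD 2 0)).getD 1 0 = pvS xs 1 - pvM xs 1 := by
      rw [gd_set_ne _ _ _ _ (by omega), gd_set_self _ _ _ (by simp; omega)]
      simp [pvS, pvM]
    have g2 : (((List.replicate xs.length (0:Int)).set 1 (xs.getD 1 0)).set 2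
        (xs.getD 1 0 + xs.getD 2 0)).getD 2 0 = pvS xs 2 - pvM xs 2 := by
      rw [gd_set_self _ _ _ (by simp; omega)]
      simp [pvS, pvM]
    have hA := loopA xs (xs.length - 3) 3 _ (by omega) (by omega) hd0 g0 g1 g2
    rw [hA]
    -- B side
    rw [pvS_drop xs hne]
    by_cases h3 : xs.length = 3
    · rw [if_pos h3, h3]
      have : pvM xs 2 = 0 := by rw [pvM]; simp
      simp [this]
    · rw [if_neg h3]
      have h4 : 4 ≤ xs.length := by omega
      have htl : (xs.take 4).length = 4 := by simp; omega
      have hB := loopB xs (xs.length - 1 - 4) 4 (xs.take 4) (le_refl 4) htl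
        (by
          intro t ht1 ht4
          rw [gd_take_lt _ _ _ ht4]
          unfold pvHv
          have : pvM xs (t-1) = 0 := by rw [pvM]; simp [show t - 1 ≤ 2 by omega]
          simp [this])
      have b3 := hB.2 (xs.length - 3) (by omega) (by omega)
      have b2 := hB.2 (xs.length - 2) (by omega) (by omega)
      rw [b3, b2]
      unfold pvHv
      have hM : pvM xs (xs.length - 1)
          = min (xs.getD (xs.length - 2) 0 + pvM xs (xs.length - 3))
                (xs.getD (xs.length - 3) 0 + pvM xs (xs.length - 4)) := by
        rw [pvM]
        have hn : ¬ (xs.length - 1 ≤ 2) := by omega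
        have e1 : xs.length - 1 - 1 = xs.length - 2 := by omega
        have e2 : xs.length - 1 - 2 = xs.length - 3 := by omega
        have e3 : xs.length - 1 - 3 = xs.length - 4 := by omega
        simp only [hn, if_false, e1, e2, e3]
      rw [hM]
      have e2 : xs.length - 3 - 1 = xs.length - 4 := by omega
      have e3 : xs.length - 2 - 1 = xs.length - 3 := by omega
      rw [e2, e3]
      simp only [List.getD]
      omega
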